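-- pv_equiv track=rewrite | github.com/andyinva/projects | bible-search/bible_search.py | _wildcard_length_matches
-- ===== SOURCE A (Python) =====
-- def _wildcard_length_matches(pattern: str, text: str) -> bool:
--     """Check if the matched text has the correct length for the wildcard pattern."""
--     # Count expected length based on pattern
--     expected_length = 0
--     for char in pattern:
--         if char == '*':
--             # * can match any length, so we can't do exact length checking for it
--             return True  # Allow * patterns (they match any length)
--         elif char == '?':
--             expected_length += 1  # ? matches exactly 1 character
--         else:
--             expected_length += 1  # Literal character
--
--     # For patterns with only ? wildcards (no *), check exact length
--     return len(text) == expected_length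
-- ===== SOURCE B (Python) =====
-- def _wildcard_length_matches(pattern: str, text: str) -> bool:
--     """Check if the matched text has the correct length for the wildcard pattern."""
--     # Pair each non-'*' pattern char with one text char in lockstep; the match
--     # succeeds iff both run out together (or a '*' is seen, which matches any length).
--     it = iter(text)
--     ok = True
--     for ch in pattern:
--         if ch == '*':
--             return True
--         if next(it, None) is None:
--             ok = False
--     return ok and next(it, None) is None
-- ===== Notes on version B (the rewrite author's own statement) =====
-- stated objective: alternative
-- what changed: B never counts or compares lengths: it consumes the text through an iterator in lockstep with the non-'*' pattern characters and decides by mutual exhaustion (text must run out exactly when the pattern does), whereas A accumulates an expected length and compares it to len(text).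
import Mathlib
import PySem

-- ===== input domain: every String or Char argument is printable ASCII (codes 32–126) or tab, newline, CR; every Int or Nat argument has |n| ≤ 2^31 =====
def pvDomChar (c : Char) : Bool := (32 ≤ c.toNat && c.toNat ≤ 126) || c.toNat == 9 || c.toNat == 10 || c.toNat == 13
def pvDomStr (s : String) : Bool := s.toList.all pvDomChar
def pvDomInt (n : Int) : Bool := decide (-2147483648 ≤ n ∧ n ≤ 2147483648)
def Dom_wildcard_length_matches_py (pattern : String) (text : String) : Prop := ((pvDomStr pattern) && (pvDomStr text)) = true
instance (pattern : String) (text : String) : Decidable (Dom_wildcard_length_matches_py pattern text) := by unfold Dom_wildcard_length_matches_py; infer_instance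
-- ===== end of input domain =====

-- B pairs pattern chars with text chars in lockstep via an iterator and decides by mutual exhaustion, instead of A's expected-length counter compared with len(text) (alternative decomposition).


-- ===== PORT A =====
-- the 'for char in pattern' loop with the running 'expected_length' accumulator;
-- 'return True' inside the loop is the 'true' branch of the recursion
def wlmLoopA (chars : List Char) (expected_length : Nat) (textLen : Nat) : Bool :=
  match chars with
  | [] => textLen == expected_length
  | c :: rest =>
    if c = '*' then true
    else if c = '?' then wlmLoopA rest (expected_length + 1) textLen
    else wlmLoopA rest (expected_length + 1) textLen

def wildcard_length_matches_py (pattern : String) (text : String) : Bool :=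
  wlmLoopA pattern.toList 0 text.toList.length

-- ===== PORT B =====
-- the text iterator is the list of not-yet-consumed text chars; next(it, None)
-- is the head match; 'ok' is B's flag recording early text exhaustion
def wlmLoopB (pchars : List Char) (it : List Char) (ok : Bool) : Bool :=
  match pchars with
  | [] => ok && it.isEmpty          -- 'return ok and next(it, None) is None'
  | c :: rest =>
    if c = '*' then true
    else
      match it with
      | [] => wlmLoopB rest [] false            -- next(it, None) is None → ok = False
      | _ :: t => wlmLoopB rest t ok            -- one text char consumed

def wildcard_length_matches_py_alt (pattern : String) (text : String) : Bool :=
  wlmLoopB pattern.toList text.toList true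

-- ===== PRECONDITION & SPEC =====
def Spec_wildcard_length_matches_py (pattern : String) (text : String) (out : Bool) : Prop := out = wildcard_length_matches_py_alt pattern text
instance (pattern : String) (text : String) (out : Bool) : Decidable (Spec_wildcard_length_matches_py pattern text out) := by unfold Spec_wildcard_length_matches_py; infer_instance

-- ===== CLAIM (what is proved, stated in full; the proofs are below) =====
def Claim_equal_wildcard_length_matches_py : Prop := ∀ (pattern : String) (text : String), Dom_wildcard_length_matches_py pattern text → Spec_wildcard_length_matches_py pattern text (wildcard_length_matches_py pattern text)

-- ===== LEMMAS AND PROOFS =====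
theorem wlmLoopA_eq (chars : List Char) (e t : Nat) :
    wlmLoopA chars e t = (chars.contains '*' || (t == e + chars.length)) := by
  induction chars generalizing e with
  | nil => simp [wlmLoopA]
  | cons c rest ih =>
    by_cases h : c = '*'
    · subst h; simp [wlmLoopA]
    · simp only [wlmLoopA, if_neg h]
      rw [show (if c = '?' then wlmLoopA rest (e+1) t else wlmLoopA rest (e+1) t)
            = wlmLoopA rest (e+1) t from by split <;> rfl, ih]
      simp [Ne.symm h, Nat.add_assoc, Nat.add_comm 1]

theorem wlmLoopB_eq (pchars : List Char) (it : List Char) (ok : Bool) :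
    wlmLoopB pchars it ok = (pchars.contains '*' || (ok && (it.length == pchars.length))) := by
  induction pchars generalizing it ok with
  | nil => cases it <;> simp [wlmLoopB]
  | cons c rest ih =>
    by_cases h : c = '*'
    · subst h; simp [wlmLoopB]
    · cases it with
      | nil => simp [wlmLoopB, if_neg h, ih, Ne.symm h]
      | cons x t => simp [wlmLoopB, if_neg h, ih, Ne.symm h]

-- ===== VERDICT (by name: the statement is the Claim_ definition above) =====
theorem wildcard_length_matches_py_spec : Claim_equal_wildcard_length_matches_py := by
  intro pattern text _
  unfold Spec_wildcard_length_matches_py wildcard_length_matches_py wildcard_length_matches_py_alt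
  rw [wlmLoopA_eq, wlmLoopB_eq]
  simp
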